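-- pv_equiv track=rewrite | github.com/Aasthaengg/IBMdataset | Python_codes/p02803/s500822991.py | mm
-- ===== SOURCE A (Python) =====
-- from collections import deque
-- from typing import List
--
-- def mm(h: int, w: int, g: List[List[str]]) -> int:
--     ret = 0
--     for i in range(h):
--         for j in range(w):
--             if (g[i][j] == '#'):
--                 continue
--             q = deque([(i, j, 0)])
--             v = [[0] * w for _ in range(h)]
--             v[i][j] = 1
--             while q:
--                 ii, jj, cnt = q.popleft()
--                 ret = max(ret, cnt)
--                 # ↓
--                 if ii < h - 1 and g[ii + 1][jj] == '.' and v[ii + 1][jj] == 0: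
--                     v[ii + 1][jj] = 1
--                     q.append((ii + 1, jj, cnt + 1))
--                 # →
--                 if jj < w - 1 and g[ii][jj + 1] == '.' and v[ii][jj + 1] == 0:
--                     v[ii][jj + 1] = 1
--                     q.append((ii, jj + 1, cnt + 1))
--                 # ↑
--                 if ii > 0 and g[ii - 1][jj] == '.' and v[ii - 1][jj] == 0:
--                     v[ii - 1][jj] = 1
--                     q.append((ii - 1, jj, cnt + 1))
--                 # ←
--                 if jj > 0 and g[ii][jj - 1] == '.' and v[ii][jj - 1] == 0:
--                     v[ii][jj - 1] = 1
--                     q.append((ii, jj - 1, cnt + 1))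
--     return ret
-- ===== SOURCE B (Python) =====
-- def mm(h, w, g):
--     INF = h * w + 1
--     best = 0
--     for i in range(h):
--         for j in range(w):
--             if g[i][j] == '#':
--                 continue
--             dist = [[(0 if (a, b) == (i, j) else INF) for b in range(w)] for a in range(h)]
--             for _ in range(h * w):
--                 nd = [[relax(h, w, g, dist, a, b) for b in range(w)] for a in range(h)]
--                 if nd == dist:
--                     break
--                 dist = nd
--             e = 0
--             for row in dist:
--                 for d in row:
--                     if d < INF:
--                         e = max(e, d)
--             best = max(best, e)
--     return best
--
--
-- def relax(h, w, g, dist, a, b):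
--     best = dist[a][b]
--     if g[a][b] == '.':
--         for (na, nb) in ((a - 1, b), (a + 1, b), (a, b - 1), (a, b + 1)):
--             if 0 <= na < h and 0 <= nb < w and dist[na][nb] + 1 < best:
--                 best = dist[na][nb] + 1
--     return best
-- ===== Notes on version B (the rewrite author's own statement) =====
-- stated objective: alternative
-- what changed: The per-source BFS with a deque and visited matrix is replaced by dynamic programming: a distance matrix is synchronously relaxed (Bellman-Ford/Jacobi style, each round recomputed from the previous matrix) until it reaches a fixpoint, and the eccentricity is the largest finite entry; no queue or frontier exists.
import Mathlib
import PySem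

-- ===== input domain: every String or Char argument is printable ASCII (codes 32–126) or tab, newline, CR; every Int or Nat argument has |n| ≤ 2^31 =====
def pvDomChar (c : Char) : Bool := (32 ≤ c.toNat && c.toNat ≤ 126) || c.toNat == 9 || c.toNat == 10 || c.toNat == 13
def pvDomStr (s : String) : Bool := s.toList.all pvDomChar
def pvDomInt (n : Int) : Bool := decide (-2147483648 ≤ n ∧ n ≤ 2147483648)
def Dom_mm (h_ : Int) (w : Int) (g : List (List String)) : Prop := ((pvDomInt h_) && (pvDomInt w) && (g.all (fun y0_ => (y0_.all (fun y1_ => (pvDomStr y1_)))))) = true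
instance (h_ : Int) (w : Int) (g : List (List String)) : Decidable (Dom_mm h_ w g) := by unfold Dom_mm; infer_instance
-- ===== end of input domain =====

-- B replaces A's per-source deque BFS by dynamic programming: a distance matrix is
-- synchronously relaxed (Bellman-Ford style) until it reaches a fixpoint and the
-- eccentricity is the largest finite entry; no queue/frontier exists (alternative algorithm).

-- ===== PORT A =====
-- grid cell access g[i][j]; every access the ports make is in range under Pre_mm
def cellA (g : List (List String)) (i j : Nat) : String := (g.getD i []).getD j ""

-- one '↓/→/↑/←' if-block of A's loop: test, append the new queue entry, mark visited
def stepA (cond : Prop) [Decidable cond] (c : Nat × Nat) (cnt : Nat)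
    (s : List (Nat × Nat × Nat) × List (Nat × Nat)) : List (Nat × Nat × Nat) × List (Nat × Nat) :=
  if cond ∧ c ∉ s.2 then (s.1 ++ [(c.1, c.2, cnt + 1)], s.2 ++ [c]) else s

-- A's while loop over the deque; the fuel h*w+1 is enough because each iteration pops one
-- entry and every enqueued entry marks a previously unvisited grid cell
def aloop (h w : Nat) (g : List (List String)) :
    Nat → List (Nat × Nat × Nat) → List (Nat × Nat) → Nat → Nat
  | 0, _, _, ret => ret
  | _ + 1, [], _, ret => ret
  | f + 1, (ii, jj, cnt) :: q, v, ret =>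
    let s := stepA (ii < h - 1 ∧ cellA g (ii + 1) jj = ".") (ii + 1, jj) cnt (q, v)
    let s := stepA (jj < w - 1 ∧ cellA g ii (jj + 1) = ".") (ii, jj + 1) cnt s
    let s := stepA (0 < ii ∧ cellA g (ii - 1) jj = ".") (ii - 1, jj) cnt s
    let s := stepA (0 < jj ∧ cellA g ii (jj - 1) = ".") (ii, jj - 1) cnt s
    aloop h w g f s.1 s.2 (max ret cnt)

def mm (h_ : Int) (w : Int) (g : List (List String)) : Int :=
  let h := h_.toNat
  let wn := w.toNat
  (((List.range h).foldl (fun ret i =>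
      (List.range wn).foldl (fun ret j =>
        if cellA g i j = "#" then ret
        else aloop h wn g (h * wn + 1) [(i, j, 0)] [(i, j)] ret) ret) 0 : Nat) : Int)

-- ===== PORT B =====
-- matrix entry dist[a][b]
def Dget (M : List (List Nat)) (a b : Nat) : Nat := (M.getD a []).getD b 0

-- the body of B's for-loop over the four neighbour candidates:
-- 'if 0 <= na < h and 0 <= nb < w and dist[na][nb] + 1 < best: best = dist[na][nb] + 1'
def rst (G : Prop) [Decidable G] (dn best : Nat) : Nat :=
  if G ∧ dn + 1 < best then dn + 1 else best

-- B's relax(h, w, g, dist, a, b), the candidate loop unrolled in order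
-- ((a-1,b),(a+1,b),(a,b-1),(a,b+1)); Python's int guard '0 <= a-1' is '1 ≤ a' here (exact:
-- a, b are Nat loop indices and the subtraction is guarded).
def relaxVal (h w : Nat) (g : List (List String)) (M : List (List Nat)) (a b : Nat) : Nat :=
  if cellA g a b = "." then
    rst (a < h ∧ b + 1 < w) (Dget M a (b + 1))
      (rst (a < h ∧ 1 ≤ b ∧ b - 1 < w) (Dget M a (b - 1))
        (rst (a + 1 < h ∧ b < w) (Dget M (a + 1) b)
          (rst (1 ≤ a ∧ a - 1 < h ∧ b < w) (Dget M (a - 1) b) (Dget M a b))))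
  else Dget M a b

-- 'nd = [[relax(...) for b in range(w)] for a in range(h)]'
def relaxRound (h w : Nat) (g : List (List String)) (M : List (List Nat)) : List (List Nat) :=
  (List.range h).map (fun a => (List.range w).map (fun b => relaxVal h w g M a b))

-- 'for _ in range(h*w): nd = ...; if nd == dist: break; dist = nd'
def rounds (h w : Nat) (g : List (List String)) : Nat → List (List Nat) → List (List Nat)
  | 0, M => M
  | m + 1, M => if relaxRound h w g M = M then M else rounds h w g m (relaxRound h w g M)

-- the initial distance matrix: 0 at the source, INF elsewhere
def initM (h w INF i j : Nat) : List (List Nat) :=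
  (List.range h).map (fun a => (List.range w).map (fun b => if (a, b) = (i, j) then 0 else INF))

-- 'e = 0; for row in dist: for d in row: if d < INF: e = max(e, d)'
def maxFinite (INF : Nat) (M : List (List Nat)) : Nat :=
  M.foldl (fun e row => row.foldl (fun e d => if d < INF then max e d else e) e) 0

-- per-source eccentricity by relaxation to a fixpoint
def eccB (h w : Nat) (g : List (List String)) (i j : Nat) : Nat :=
  maxFinite (h * w + 1) (rounds h w g (h * w) (initM h w (h * w + 1) i j))

def mm_alt (h_ : Int) (w : Int) (g : List (List String)) : Int :=
  let h := h_.toNat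
  let wn := w.toNat
  (((List.range h).foldl (fun best i =>
      (List.range wn).foldl (fun best j =>
        if cellA g i j = "#" then best
        else max best (eccB h wn g i j)) best) 0 : Nat) : Int)

-- ===== PRECONDITION & SPEC =====
-- Pre_mm: exactly the inputs where Python A's g[i][j] indexing never raises IndexError:
-- either w ≤ 0 (the inner loop never runs, nothing is indexed), or the grid has at least
-- h rows and each of the first h rows has at least w cells.
def Pre_mm (h_ : Int) (w : Int) (g : List (List String)) : Prop :=
  w.toNat = 0 ∨ (h_.toNat ≤ g.length ∧ ∀ r ∈ g.take h_.toNat, w.toNat ≤ r.length)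
instance (h_ : Int) (w : Int) (g : List (List String)) : Decidable (Pre_mm h_ w g) := by
  unfold Pre_mm; infer_instance

def pvWitness_mm : Int × Int × List (List String) := (2, 2, [[".", "#"], [".", "."]])

def Spec_mm (h_ : Int) (w : Int) (g : List (List String)) (out : Int) : Prop := out = mm_alt h_ w g
instance (h_ : Int) (w : Int) (g : List (List String)) (out : Int) : Decidable (Spec_mm h_ w g out) := by unfold Spec_mm; infer_instance

-- ===== CLAIM (what is proved, stated in full; the proofs are below) =====
def Claim_equal_mm : Prop := ∀ (h_ : Int) (w : Int) (g : List (List String)), Dom_mm h_ w g → Pre_mm h_ w g → Spec_mm h_ w g (mm h_ w g)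

-- ===== LEMMAS AND PROOFS =====

-- ---------- proof-side level-synchronous BFS (bridge between the two ports) ----------
def stepB (cond : Prop) [Decidable cond] (c : Nat × Nat)
    (s : List (Nat × Nat) × List (Nat × Nat)) : List (Nat × Nat) × List (Nat × Nat) :=
  if cond ∧ c ∉ s.2 then (s.1 ++ [c], s.2 ++ [c]) else s

def expandB (h w : Nat) (g : List (List String))
    (s : List (Nat × Nat) × List (Nat × Nat)) (c : Nat × Nat) : List (Nat × Nat) × List (Nat × Nat) :=
  match c with
  | (ii, jj) =>
    let s := stepB (ii + 1 < h ∧ cellA g (ii + 1) jj = ".") (ii + 1, jj) s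
    let s := stepB (jj + 1 < w ∧ cellA g ii (jj + 1) = ".") (ii, jj + 1) s
    let s := stepB (1 ≤ ii ∧ ii - 1 < h ∧ cellA g (ii - 1) jj = ".") (ii - 1, jj) s
    let s := stepB (1 ≤ jj ∧ jj - 1 < w ∧ cellA g ii (jj - 1) = ".") (ii, jj - 1) s
    s

def bloop (h w : Nat) (g : List (List String)) :
    Nat → List (Nat × Nat) → List (Nat × Nat) → Nat → Nat
  | 0, _, _, lvl => lvl
  | f + 1, fr, v, lvl =>
    let s := fr.foldl (expandB h w g) ([], v)
    if s.1 = [] then lvl else bloop h w g f s.1 s.2 (lvl + 1)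

theorem aloop_nil (h w : Nat) (g : List (List String)) (f : Nat) (v : List (Nat × Nat)) (ret : Nat) :
    aloop h w g f [] v ret = ret := by
  cases f <;> simp [aloop]

-- a state transformer that appends to the frontier component and only reads/extends visited
def Affine (f : List (Nat × Nat) × List (Nat × Nat) → List (Nat × Nat) × List (Nat × Nat)) : Prop :=
  ∀ s, f s = (s.1 ++ (f ([], s.2)).1, (f ([], s.2)).2)

theorem affine_comp {f g : List (Nat × Nat) × List (Nat × Nat) → List (Nat × Nat) × List (Nat × Nat)}
    (hf : Affine f) (hg : Affine g) : Affine (fun s => g (f s)) := by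
  intro s
  show g (f s) = (s.1 ++ (g (f ([], s.2))).1, (g (f ([], s.2))).2)
  rw [hf s, hg ((s.1 ++ (f ([], s.2)).1, (f ([], s.2)).2)), hg (f ([], s.2))]
  simp

theorem affine_stepB (cond : Prop) [Decidable cond] (c : Nat × Nat) : Affine (stepB cond c) := by
  intro s
  simp only [stepB]
  split_ifs <;> simp

theorem affine_expandB (h w : Nat) (g : List (List String)) (c : Nat × Nat) :
    Affine (fun s => expandB h w g s c) := by
  obtain ⟨ii, jj⟩ := c
  exact affine_comp (affine_comp (affine_comp (affine_stepB _ _) (affine_stepB _ _)) (affine_stepB _ _)) (affine_stepB _ _)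

theorem affine_foldl_expandB (h w : Nat) (g : List (List String)) :
    ∀ (fr : List (Nat × Nat)), Affine (fun s => fr.foldl (expandB h w g) s) := by
  intro fr
  induction fr with
  | nil => intro s; simp
  | cons c fr ih =>
    have := affine_comp (affine_expandB h w g c) ih
    intro s
    simpa [List.foldl_cons] using this s

theorem stepA_stepB (ca cb : Prop) [Decidable ca] [Decidable cb] (hiff : ca ↔ cb)
    (c : Nat × Nat) (cnt : Nat) (q0 : List (Nat × Nat × Nat)) (t : List (Nat × Nat) × List (Nat × Nat))
    (Q : List (Nat × Nat × Nat)) (V : List (Nat × Nat))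
    (hQ : Q = q0 ++ t.1.map (fun p => (p.1, p.2, cnt + 1))) (hV : V = t.2) :
    stepA ca c cnt (Q, V)
      = (q0 ++ ((stepB cb c t).1).map (fun p => (p.1, p.2, cnt + 1)), (stepB cb c t).2) := by
  subst hQ hV
  simp only [stepA, stepB, hiff]
  split_ifs <;> simp

theorem aloop_pop (h w : Nat) (g : List (List String)) (f ii jj cnt : Nat)
    (q : List (Nat × Nat × Nat)) (v : List (Nat × Nat)) (ret : Nat)
    (hi : ii < h) (hj : jj < w) :
    aloop h w g (f + 1) ((ii, jj, cnt) :: q) v ret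
      = aloop h w g f (q ++ ((expandB h w g ([], v) (ii, jj)).1).map (fun c => (c.1, c.2, cnt + 1)))
          (expandB h w g ([], v) (ii, jj)).2 (max ret cnt) := by
  simp only [aloop, expandB]
  rw [stepA_stepB (ii < h - 1 ∧ cellA g (ii + 1) jj = ".") (ii + 1 < h ∧ cellA g (ii + 1) jj = ".")
        (by constructor <;> (rintro ⟨h1, h2⟩; exact ⟨by omega, h2⟩)) _ cnt q ([], v) _ _ (by simp) rfl]
  rw [stepA_stepB (jj < w - 1 ∧ cellA g ii (jj + 1) = ".") (jj + 1 < w ∧ cellA g ii (jj + 1) = ".")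
        (by constructor <;> (rintro ⟨h1, h2⟩; exact ⟨by omega, h2⟩)) _ cnt q _ _ _ rfl rfl]
  rw [stepA_stepB (0 < ii ∧ cellA g (ii - 1) jj = ".") (1 ≤ ii ∧ ii - 1 < h ∧ cellA g (ii - 1) jj = ".")
        (by constructor; · rintro ⟨h1, h2⟩; exact ⟨by omega, by omega, h2⟩
            · rintro ⟨h1, h2, h3⟩; exact ⟨by omega, h3⟩) _ cnt q _ _ _ rfl rfl]
  rw [stepA_stepB (0 < jj ∧ cellA g ii (jj - 1) = ".") (1 ≤ jj ∧ jj - 1 < w ∧ cellA g ii (jj - 1) = ".")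
        (by constructor; · rintro ⟨h1, h2⟩; exact ⟨by omega, by omega, h2⟩
            · rintro ⟨h1, h2, h3⟩; exact ⟨by omega, h3⟩) _ cnt q _ _ _ rfl rfl]

theorem aloop_level (h w : Nat) (g : List (List String)) (L : Nat) :
    ∀ (q1 : List (Nat × Nat)), (∀ c ∈ q1, c.1 < h ∧ c.2 < w) →
    ∀ (f : Nat) (q2 v : List (Nat × Nat)) (ret : Nat),
    aloop h w g (f + q1.length) (q1.map (fun c => (c.1, c.2, L)) ++ q2.map (fun c => (c.1, c.2, L + 1))) v ret
      = aloop h w g f ((q2 ++ (q1.foldl (expandB h w g) ([], v)).1).map (fun c => (c.1, c.2, L + 1)))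
          (q1.foldl (expandB h w g) ([], v)).2 (if q1 = [] then ret else max ret L) := by
  intro q1
  induction q1 with
  | nil => intro _ f q2 v ret; simp
  | cons c q1 ih =>
    intro hg f q2 v ret
    obtain ⟨ci, cj⟩ := c
    have hc := hg (ci, cj) (by simp)
    have hrest : ∀ x ∈ q1, x.1 < h ∧ x.2 < w := fun x hx => hg x (by simp [hx])
    have hlen : f + ((ci, cj) :: q1).length = (f + q1.length) + 1 := by simp; omega
    rw [hlen]
    simp only [List.map_cons, List.cons_append]
    rw [aloop_pop h w g (f + q1.length) ci cj L
        (q1.map (fun c => (c.1, c.2, L)) ++ q2.map (fun c => (c.1, c.2, L + 1))) v ret hc.1 hc.2]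
    have harr : (q1.map (fun c => (c.1, c.2, L)) ++ q2.map (fun c => (c.1, c.2, L + 1))) ++
          ((expandB h w g ([], v) (ci, cj)).1).map (fun c => (c.1, c.2, L + 1))
        = q1.map (fun c => (c.1, c.2, L)) ++
          (q2 ++ (expandB h w g ([], v) (ci, cj)).1).map (fun c => (c.1, c.2, L + 1)) := by
      simp [List.map_append]
    rw [harr, ih hrest f (q2 ++ (expandB h w g ([], v) (ci, cj)).1) (expandB h w g ([], v) (ci, cj)).2 (max ret L)]
    have hfold : ((ci, cj) :: q1).foldl (expandB h w g) ([], v)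
        = ((expandB h w g ([], v) (ci, cj)).1 ++ (q1.foldl (expandB h w g) ([], (expandB h w g ([], v) (ci, cj)).2)).1,
           (q1.foldl (expandB h w g) ([], (expandB h w g ([], v) (ci, cj)).2)).2) := by
      rw [List.foldl_cons]
      exact affine_foldl_expandB h w g q1 (expandB h w g ([], v) (ci, cj))
    rw [hfold]
    have hmax : (if q1 = [] then max ret L else max (max ret L) L) = max ret L := by
      split <;> omega
    rw [hmax]
    simp [List.append_assoc]

theorem bloop_ge (h w : Nat) (g : List (List String)) :
    ∀ (f : Nat) (fr v : List (Nat × Nat)) (lvl : Nat), lvl ≤ bloop h w g f fr v lvl := by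
  intro f
  induction f with
  | zero => intro fr v lvl; simp [bloop]
  | succ f ih =>
    intro fr v lvl
    simp only [bloop]
    split
    · exact le_refl _
    · exact le_trans (Nat.le_succ _) (ih _ _ _)

def allCells (h w : Nat) : List (Nat × Nat) :=
  (List.range h).flatMap (fun i => (List.range w).map (fun j => (i, j)))

theorem mem_allCells {h w i j : Nat} : (i, j) ∈ allCells h w ↔ i < h ∧ j < w := by
  simp [allCells]

theorem nodup_allCells (h w : Nat) : (allCells h w).Nodup :=
  List.Nodup.product (List.nodup_range) (List.nodup_range)

theorem length_allCells (h w : Nat) : (allCells h w).length = h * w := by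
  simp [allCells, List.length_flatMap]

def unv (h w : Nat) (v : List (Nat × Nat)) : Nat :=
  (allCells h w).countP (fun c => decide (c ∉ v))

theorem unv_le (h w : Nat) (v : List (Nat × Nat)) : unv h w v ≤ h * w :=
  le_trans List.countP_le_length (le_of_eq (length_allCells h w))

theorem countP_snoc_mem {c : Nat × Nat} {v : List (Nat × Nat)} :
    ∀ {l : List (Nat × Nat)}, l.Nodup → c ∈ l → c ∉ v →
    l.countP (fun x => decide (x ∉ v ++ [c])) + 1 = l.countP (fun x => decide (x ∉ v)) := by
  intro l
  induction l with
  | nil => intro _ hc; cases hc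
  | cons a l ih =>
    intro hn hc hv
    rw [List.countP_cons, List.countP_cons]
    rcases List.mem_cons.1 hc with hac | hc'
    · subst hac
      have hnotin : c ∉ l := (List.nodup_cons.1 hn).1
      have : l.countP (fun x => decide (x ∉ v ++ [c])) = l.countP (fun x => decide (x ∉ v)) := by
        apply List.countP_congr
        intro x hx
        have hxa : x ≠ c := fun h => hnotin (h ▸ hx)
        simp [List.mem_append, hxa]
      rw [this]
      simp [hv]
    · have hna : a ≠ c := by
        rintro rfl; exact (List.nodup_cons.1 hn).1 hc'
      have hsame : (decide (a ∉ v ++ [c]) : Bool) = decide (a ∉ v) := by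
        simp [List.mem_append, hna]
      rw [hsame]
      have := ih (List.nodup_cons.1 hn).2 hc' hv
      omega

theorem unv_snoc (h w : Nat) {v : List (Nat × Nat)} {c : Nat × Nat}
    (hg : c ∈ allCells h w) (hv : c ∉ v) : unv h w (v ++ [c]) + 1 = unv h w v :=
  countP_snoc_mem (nodup_allCells h w) hg hv

theorem stepB_unv (h w : Nat) (cond : Prop) [Decidable cond] {c : Nat × Nat}
    (hc : cond → c.1 < h ∧ c.2 < w) (s : List (Nat × Nat) × List (Nat × Nat)) :
    unv h w (stepB cond c s).2 + (stepB cond c s).1.length = unv h w s.2 + s.1.length := by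
  obtain ⟨ci, cj⟩ := c
  simp only [stepB]
  split_ifs with hcc
  · have hmem : (ci, cj) ∈ allCells h w := mem_allCells.2 (hc hcc.1)
    have := unv_snoc h w hmem hcc.2
    simp only [List.length_append, List.length_cons, List.length_nil]
    omega
  · rfl

theorem stepB_grid {h w : Nat} (cond : Prop) [Decidable cond] {c : Nat × Nat}
    (hc : cond → c.1 < h ∧ c.2 < w) {s : List (Nat × Nat) × List (Nat × Nat)}
    (hs : ∀ x ∈ s.1, x.1 < h ∧ x.2 < w) :
    ∀ x ∈ (stepB cond c s).1, x.1 < h ∧ x.2 < w := by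
  simp only [stepB]
  split_ifs with hcc
  · intro x hx
    rcases List.mem_append.1 hx with hx' | hx'
    · exact hs x hx'
    · simp at hx'; subst hx'; exact hc hcc.1
  · exact hs

theorem expandB_unv (h w : Nat) (g : List (List String)) (ii jj : Nat) (hi : ii < h) (hj : jj < w)
    (s : List (Nat × Nat) × List (Nat × Nat)) :
    unv h w (expandB h w g s (ii, jj)).2 + (expandB h w g s (ii, jj)).1.length
      = unv h w s.2 + s.1.length := by
  simp only [expandB]
  refine Eq.trans (stepB_unv _ _ _ (fun hq => ⟨hi, by omega⟩) _)
    (Eq.trans (stepB_unv _ _ _ (fun hq => ⟨by omega, hj⟩) _)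
      (Eq.trans (stepB_unv _ _ _ (fun hq => ⟨hi, hq.1⟩) _)
        (stepB_unv _ _ _ (fun hq => ⟨hq.1, hj⟩) _)))

theorem expandB_grid (h w : Nat) (g : List (List String)) (ii jj : Nat) (hi : ii < h) (hj : jj < w)
    {s : List (Nat × Nat) × List (Nat × Nat)} (hs : ∀ x ∈ s.1, x.1 < h ∧ x.2 < w) :
    ∀ x ∈ (expandB h w g s (ii, jj)).1, x.1 < h ∧ x.2 < w := by
  simp only [expandB]
  exact stepB_grid _ (fun hq => ⟨hi, by omega⟩)
    (stepB_grid _ (fun hq => ⟨by omega, hj⟩)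
      (stepB_grid _ (fun hq => ⟨hi, hq.1⟩)
        (stepB_grid _ (fun hq => ⟨hq.1, hj⟩) hs)))

theorem foldl_expandB_unv (h w : Nat) (g : List (List String)) :
    ∀ (fr : List (Nat × Nat)), (∀ c ∈ fr, c.1 < h ∧ c.2 < w) →
    ∀ (s : List (Nat × Nat) × List (Nat × Nat)),
    unv h w (fr.foldl (expandB h w g) s).2 + (fr.foldl (expandB h w g) s).1.length
      = unv h w s.2 + s.1.length := by
  intro fr
  induction fr with
  | nil => intro _ s; rfl
  | cons c fr ih =>
    intro hg s
    obtain ⟨ci, cj⟩ := c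
    have hc := hg (ci, cj) (by simp)
    rw [List.foldl_cons, ih (fun x hx => hg x (by simp [hx])) _,
        expandB_unv h w g ci cj hc.1 hc.2 s]

theorem foldl_expandB_grid (h w : Nat) (g : List (List String)) :
    ∀ (fr : List (Nat × Nat)), (∀ c ∈ fr, c.1 < h ∧ c.2 < w) →
    ∀ (s : List (Nat × Nat) × List (Nat × Nat)), (∀ x ∈ s.1, x.1 < h ∧ x.2 < w) →
    ∀ x ∈ (fr.foldl (expandB h w g) s).1, x.1 < h ∧ x.2 < w := by
  intro fr
  induction fr with
  | nil => intro _ s hs; exact hs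
  | cons c fr ih =>
    intro hg s hs
    obtain ⟨ci, cj⟩ := c
    have hc := hg (ci, cj) (by simp)
    rw [List.foldl_cons]
    exact ih (fun x hx => hg x (by simp [hx])) _ (expandB_grid h w g ci cj hc.1 hc.2 hs)

theorem aloop_bloop (h w : Nat) (g : List (List String)) :
    ∀ (fb : Nat) (fr v : List (Nat × Nat)) (ret L fa : Nat),
      fr ≠ [] → (∀ c ∈ fr, c.1 < h ∧ c.2 < w) →
      fr.length + unv h w v ≤ fa → unv h w v < fb →
      aloop h w g fa (fr.map (fun c => (c.1, c.2, L))) v ret = max ret (bloop h w g fb fr v L) := by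
  intro fb
  induction fb with
  | zero => intro fr v ret L fa _ _ _ hfb; omega
  | succ fb ih =>
    intro fr v ret L fa hne hgrid hfa hfb
    obtain ⟨fa', rfl⟩ : ∃ fa', fa = fa' + fr.length := ⟨fa - fr.length, by omega⟩
    have hlev := aloop_level h w g L fr hgrid fa' [] v ret
    simp only [List.map_nil, List.nil_append, List.append_nil, if_neg hne] at hlev
    rw [hlev]
    have hacc := foldl_expandB_unv h w g fr hgrid ([], v)
    simp only [List.length_nil, Nat.add_zero] at hacc
    by_cases hX : (fr.foldl (expandB h w g) ([], v)).1 = []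
    · rw [hX]
      simp only [List.map_nil, aloop_nil]
      simp [bloop, hX]
    · have hbl : bloop h w g (fb + 1) fr v L
          = bloop h w g fb (fr.foldl (expandB h w g) ([], v)).1 (fr.foldl (expandB h w g) ([], v)).2 (L + 1) := by
        simp only [bloop]
        rw [if_neg hX]
      rw [hbl]
      have hlenpos : 1 ≤ (fr.foldl (expandB h w g) ([], v)).1.length := by
        cases hXl : (fr.foldl (expandB h w g) ([], v)).1 with
        | nil => exact absurd hXl hX
        | cons a l => simp
      rw [ih (fr.foldl (expandB h w g) ([], v)).1 (fr.foldl (expandB h w g) ([], v)).2 (max ret L) (L + 1) fa'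
            hX (foldl_expandB_grid h w g fr hgrid ([], v) (by simp)) (by omega) (by omega)]
      have := bloop_ge h w g fb (fr.foldl (expandB h w g) ([], v)).1 (fr.foldl (expandB h w g) ([], v)).2 (L + 1)
      omega

theorem source_eq (h w : Nat) (g : List (List String)) (i j : Nat) (hi : i < h) (hj : j < w) (ret : Nat) :
    aloop h w g (h * w + 1) [(i, j, 0)] [(i, j)] ret
      = max ret (bloop h w g (h * w + 1) [(i, j)] [(i, j)] 0) := by
  have hu := unv_le h w [(i, j)]
  have := aloop_bloop h w g (h * w + 1) [(i, j)] [(i, j)] ret 0 (h * w + 1)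
    (by simp) (by simp [hi, hj]) (by simp; omega) (by omega)
  simpa using this

-- ---------- matrix access lemmas ----------

theorem getD_range_map {α : Type} (f : Nat → α) (d : α) {h a : Nat} (ha : a < h) :
    ((List.range h).map f).getD a d = f a := by
  rw [List.getD_eq_getElem?_getD]
  simp [ha]

theorem Dget_relaxRound (h w : Nat) (g : List (List String)) (M : List (List Nat))
    {a b : Nat} (ha : a < h) (hb : b < w) :
    Dget (relaxRound h w g M) a b = relaxVal h w g M a b := by
  unfold Dget relaxRound
  rw [getD_range_map _ _ ha, getD_range_map _ _ hb]

theorem Dget_initM (h w INF i j : Nat) {a b : Nat} (ha : a < h) (hb : b < w) :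
    Dget (initM h w INF i j) a b = if (a, b) = (i, j) then 0 else INF := by
  unfold Dget initM
  rw [getD_range_map _ _ ha, getD_range_map _ _ hb]

def ShapedM (h w : Nat) (M : List (List Nat)) : Prop :=
  M.length = h ∧ ∀ r ∈ M, r.length = w

theorem shaped_range_map (h w : Nat) (f : Nat → Nat → Nat) :
    ShapedM h w ((List.range h).map (fun a => (List.range w).map (f a))) := by
  constructor
  · simp
  · intro r hr
    simp only [List.mem_map] at hr
    obtain ⟨a, _, rfl⟩ := hr
    simp

theorem shaped_relaxRound (h w : Nat) (g : List (List String)) (M : List (List Nat)) :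
    ShapedM h w (relaxRound h w g M) := shaped_range_map h w _

theorem shaped_initM (h w INF i j : Nat) : ShapedM h w (initM h w INF i j) := shaped_range_map h w _

theorem Dget_eq_getElem {M : List (List Nat)} {a b : Nat} (ha : a < M.length)
    (hb : b < (M[a]).length) : Dget M a b = M[a][b] := by
  unfold Dget
  have h1 : M.getD a [] = M[a] := by
    rw [List.getD_eq_getElem?_getD, List.getElem?_eq_getElem ha]; rfl
  rw [h1, List.getD_eq_getElem?_getD, List.getElem?_eq_getElem hb]; rfl

theorem matrix_ext {h w : Nat} {M N : List (List Nat)} (hM : ShapedM h w M) (hN : ShapedM h w N)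
    (hD : ∀ a < h, ∀ b < w, Dget M a b = Dget N a b) : M = N := by
  apply List.ext_getElem (hM.1.trans hN.1.symm)
  intro a h1 h2
  have hrM : (M[a]).length = w := hM.2 _ (M.getElem_mem h1)
  have hrN : (N[a]).length = w := hN.2 _ (N.getElem_mem h2)
  apply List.ext_getElem (hrM.trans hrN.symm)
  intro b hb1 hb2
  have hah : a < h := by rw [← hM.1]; exact h1
  have hbw : b < w := by rw [← hrM]; exact hb1
  have := hD a hah b hbw
  rwa [Dget_eq_getElem h1 hb1, Dget_eq_getElem h2 hb2] at this

-- ---------- relaxVal characterisation ----------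

theorem rst_le (G : Prop) [Decidable G] (dn best : Nat) : rst G dn best ≤ best := by
  unfold rst; split_ifs with hc
  · omega
  · exact le_refl _

theorem rst_le_dn (G : Prop) [Decidable G] (dn best : Nat) (hG : G) : rst G dn best ≤ dn + 1 := by
  unfold rst; split_ifs with hc
  · omega
  · have : ¬ dn + 1 < best := fun hl => hc ⟨hG, hl⟩
    omega

theorem rst_cases (G : Prop) [Decidable G] (dn best : Nat) :
    rst G dn best = best ∨ (G ∧ rst G dn best = dn + 1 ∧ rst G dn best < best) := by
  unfold rst; split_ifs with hc
  · exact Or.inr ⟨hc.1, rfl, hc.2⟩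
  · exact Or.inl rfl

def AdjN (h w : Nat) (c n : Nat × Nat) : Prop :=
  n.1 < h ∧ n.2 < w ∧
    ((c.1 = n.1 + 1 ∧ c.2 = n.2) ∨ (n.1 = c.1 + 1 ∧ c.2 = n.2) ∨
     (c.2 = n.2 + 1 ∧ c.1 = n.1) ∨ (n.2 = c.2 + 1 ∧ c.1 = n.1))

theorem adjN_case1 (h w a b : Nat) (h1 : 1 ≤ a) (h2 : a - 1 < h) (h3 : b < w) :
    AdjN h w (a, b) (a - 1, b) := by
  unfold AdjN
  exact ⟨h2, h3, Or.inl ⟨show a = a - 1 + 1 by omega, rfl⟩⟩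

theorem adjN_case2 (h w a b : Nat) (h2 : a + 1 < h) (h3 : b < w) :
    AdjN h w (a, b) (a + 1, b) := by
  unfold AdjN
  exact ⟨h2, h3, Or.inr (Or.inl ⟨rfl, rfl⟩)⟩

theorem adjN_case3 (h w a b : Nat) (h1 : 1 ≤ b) (h2 : a < h) (h3 : b - 1 < w) :
    AdjN h w (a, b) (a, b - 1) := by
  unfold AdjN
  exact ⟨h2, h3, Or.inr (Or.inr (Or.inl ⟨show b = b - 1 + 1 by omega, rfl⟩))⟩

theorem adjN_case4 (h w a b : Nat) (h2 : a < h) (h3 : b + 1 < w) :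
    AdjN h w (a, b) (a, b + 1) := by
  unfold AdjN
  exact ⟨h2, h3, Or.inr (Or.inr (Or.inr ⟨rfl, rfl⟩))⟩

theorem rv_le_adj (h w : Nat) (g : List (List String)) (M : List (List Nat)) (a b : Nat)
    (n : Nat × Nat) (hdot : cellA g a b = ".") (hadj : AdjN h w (a, b) n) :
    relaxVal h w g M a b ≤ Dget M n.1 n.2 + 1 := by
  obtain ⟨n1, n2⟩ := n
  obtain ⟨hn1, hn2, hd⟩ := hadj
  simp only at hn1 hn2 hd
  unfold relaxVal
  rw [if_pos hdot]
  rcases hd with ⟨ha, hb⟩ | ⟨ha, hb⟩ | ⟨ha, hb⟩ | ⟨ha, hb⟩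
  · -- n = (a-1, b)
    have h1 : n1 = a - 1 := by omega
    have h2 : n2 = b := by omega
    subst h1; subst h2
    refine le_trans (rst_le _ _ _) (le_trans (rst_le _ _ _) (le_trans (rst_le _ _ _) ?_))
    apply rst_le_dn
    exact ⟨by omega, by omega, by omega⟩
  · -- n = (a+1, b)
    have h1 : n1 = a + 1 := by omega
    have h2 : n2 = b := by omega
    subst h1; subst h2
    refine le_trans (rst_le _ _ _) (le_trans (rst_le _ _ _) ?_)
    apply rst_le_dn
    exact ⟨by omega, by omega⟩
  · -- n = (a, b-1)
    have h1 : n1 = a := by omega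
    have h2 : n2 = b - 1 := by omega
    subst h1; subst h2
    refine le_trans (rst_le _ _ _) ?_
    apply rst_le_dn
    exact ⟨by omega, by omega, by omega⟩
  · -- n = (a, b+1)
    have h1 : n1 = a := by omega
    have h2 : n2 = b + 1 := by omega
    subst h1; subst h2
    apply rst_le_dn
    exact ⟨by omega, by omega⟩

theorem rv_cases (h w : Nat) (g : List (List String)) (M : List (List Nat)) (a b : Nat) :
    relaxVal h w g M a b = Dget M a b ∨
      (cellA g a b = "." ∧ ∃ n : Nat × Nat, AdjN h w (a, b) n ∧
        relaxVal h w g M a b = Dget M n.1 n.2 + 1 ∧ relaxVal h w g M a b < Dget M a b) := by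
  unfold relaxVal
  split_ifs with hdot
  swap
  · exact Or.inl rfl
  · set t0 := Dget M a b with ht0
    set t1 := rst (1 ≤ a ∧ a - 1 < h ∧ b < w) (Dget M (a - 1) b) t0 with ht1
    set t2 := rst (a + 1 < h ∧ b < w) (Dget M (a + 1) b) t1 with ht2
    set t3 := rst (a < h ∧ 1 ≤ b ∧ b - 1 < w) (Dget M a (b - 1)) t2 with ht3
    have l1 : t1 ≤ t0 := rst_le _ _ _
    have l2 : t2 ≤ t1 := rst_le _ _ _
    have l3 : t3 ≤ t2 := rst_le _ _ _
    rcases rst_cases (a < h ∧ b + 1 < w) (Dget M a (b + 1)) t3 with h4 | ⟨hg4, he4, hlt4⟩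
    · rw [h4]
      rcases rst_cases (a < h ∧ 1 ≤ b ∧ b - 1 < w) (Dget M a (b - 1)) t2 with h3 | ⟨hg3, he3, hlt3⟩
      · rw [← ht3] at h3
        rw [h3]
        rcases rst_cases (a + 1 < h ∧ b < w) (Dget M (a + 1) b) t1 with h2 | ⟨hg2, he2, hlt2⟩
        · rw [← ht2] at h2
          rw [h2]
          rcases rst_cases (1 ≤ a ∧ a - 1 < h ∧ b < w) (Dget M (a - 1) b) t0 with h1 | ⟨hg1, he1, hlt1⟩
          · rw [← ht1] at h1; exact Or.inl h1
          · rw [← ht1] at he1 hlt1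
            exact Or.inr ⟨hdot, ⟨(a - 1, b), adjN_case1 h w a b hg1.1 hg1.2.1 hg1.2.2, he1, hlt1⟩⟩
        · rw [← ht2] at he2 hlt2
          exact Or.inr ⟨hdot, ⟨(a + 1, b), adjN_case2 h w a b hg2.1 hg2.2, he2, by omega⟩⟩
      · rw [← ht3] at he3 hlt3
        exact Or.inr ⟨hdot, ⟨(a, b - 1), adjN_case3 h w a b hg3.2.1 hg3.1 hg3.2.2, he3, by omega⟩⟩
    · exact Or.inr ⟨hdot, ⟨(a, b + 1), adjN_case4 h w a b hg4.1 hg4.2, he4, by omega⟩⟩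

-- ---------- frontier-set characterisation of the level step ----------

def Acond (h w : Nat) (g : List (List String)) (p c : Nat × Nat) : Prop :=
  (p.1 + 1 < h ∧ cellA g (p.1 + 1) p.2 = "." ∧ c = (p.1 + 1, p.2)) ∨
  (p.2 + 1 < w ∧ cellA g p.1 (p.2 + 1) = "." ∧ c = (p.1, p.2 + 1)) ∨
  (1 ≤ p.1 ∧ p.1 - 1 < h ∧ cellA g (p.1 - 1) p.2 = "." ∧ c = (p.1 - 1, p.2)) ∨
  (1 ≤ p.2 ∧ p.2 - 1 < w ∧ cellA g p.1 (p.2 - 1) = "." ∧ c = (p.1, p.2 - 1))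

theorem stepB_mem1 (cond : Prop) [Decidable cond] (c : Nat × Nat)
    (s : List (Nat × Nat) × List (Nat × Nat)) (x : Nat × Nat) :
    x ∈ (stepB cond c s).1 ↔ x ∈ s.1 ∨ (cond ∧ c ∉ s.2 ∧ x = c) := by
  unfold stepB; split_ifs with hc
  · simp only [List.mem_append, List.mem_singleton]
    tauto
  · tauto

theorem stepB_mem2 (cond : Prop) [Decidable cond] (c : Nat × Nat)
    (s : List (Nat × Nat) × List (Nat × Nat)) (x : Nat × Nat) :
    x ∈ (stepB cond c s).2 ↔ x ∈ s.2 ∨ (cond ∧ c ∉ s.2 ∧ x = c) := by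
  unfold stepB; split_ifs with hc
  · simp only [List.mem_append, List.mem_singleton]
    tauto
  · tauto

theorem stepB_memA (cond : Prop) [Decidable cond] (c : Nat × Nat)
    (s : List (Nat × Nat) × List (Nat × Nat)) (x : Nat × Nat) :
    x ∈ (stepB cond c s).1 ↔ x ∈ s.1 ∨ (x ∉ s.2 ∧ (cond ∧ x = c)) := by
  rw [stepB_mem1]
  by_cases hx : x = c
  · subst hx; simp; tauto
  · simp [hx]

theorem stepB_memB (cond : Prop) [Decidable cond] (c : Nat × Nat)
    (s : List (Nat × Nat) × List (Nat × Nat)) (x : Nat × Nat) :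
    x ∈ (stepB cond c s).2 ↔ x ∈ s.2 ∨ (x ∉ s.2 ∧ (cond ∧ x = c)) := by
  rw [stepB_mem2]
  by_cases hx : x = c
  · subst hx; simp; tauto
  · simp [hx]

theorem comp_mem {α : Type} (s1 s2 s3 : List α × List α) (P Q : α → Prop)
    (h1a : ∀ x, x ∈ s2.1 ↔ x ∈ s1.1 ∨ (x ∉ s1.2 ∧ P x))
    (h1b : ∀ x, x ∈ s2.2 ↔ x ∈ s1.2 ∨ (x ∉ s1.2 ∧ P x))
    (h2a : ∀ x, x ∈ s3.1 ↔ x ∈ s2.1 ∨ (x ∉ s2.2 ∧ Q x))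
    (h2b : ∀ x, x ∈ s3.2 ↔ x ∈ s2.2 ∨ (x ∉ s2.2 ∧ Q x)) :
    (∀ x, x ∈ s3.1 ↔ x ∈ s1.1 ∨ (x ∉ s1.2 ∧ (P x ∨ Q x))) ∧
    (∀ x, x ∈ s3.2 ↔ x ∈ s1.2 ∨ (x ∉ s1.2 ∧ (P x ∨ Q x))) := by
  constructor
  · intro x; rw [h2a x, h1a x, h1b x]; tauto
  · intro x; rw [h2b x, h1b x]; tauto

theorem expand_mem (h w : Nat) (g : List (List String)) (p : Nat × Nat)
    (s : List (Nat × Nat) × List (Nat × Nat)) :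
    (∀ x, x ∈ (expandB h w g s p).1 ↔ x ∈ s.1 ∨ (x ∉ s.2 ∧ Acond h w g p x)) ∧
    (∀ x, x ∈ (expandB h w g s p).2 ↔ x ∈ s.2 ∨ (x ∉ s.2 ∧ Acond h w g p x)) := by
  obtain ⟨p1, p2⟩ := p
  have c12 := comp_mem s _ _
      (fun x => (p1 + 1 < h ∧ cellA g (p1 + 1) p2 = ".") ∧ x = (p1 + 1, p2))
      (fun x => (p2 + 1 < w ∧ cellA g p1 (p2 + 1) = ".") ∧ x = (p1, p2 + 1))
      (stepB_memA _ _ s) (stepB_memB _ _ s)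
      (stepB_memA _ _ (stepB _ (p1 + 1, p2) s)) (stepB_memB _ _ (stepB _ (p1 + 1, p2) s))
  have c123 := comp_mem s _ _ _
      (fun x => (1 ≤ p1 ∧ p1 - 1 < h ∧ cellA g (p1 - 1) p2 = ".") ∧ x = (p1 - 1, p2))
      c12.1 c12.2
      (stepB_memA _ _ (stepB _ (p1, p2 + 1) (stepB _ (p1 + 1, p2) s)))
      (stepB_memB _ _ (stepB _ (p1, p2 + 1) (stepB _ (p1 + 1, p2) s)))
  have c1234 := comp_mem s _ _ _
      (fun x => (1 ≤ p2 ∧ p2 - 1 < w ∧ cellA g p1 (p2 - 1) = ".") ∧ x = (p1, p2 - 1))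
      c123.1 c123.2
      (stepB_memA _ _ (stepB _ (p1 - 1, p2) (stepB _ (p1, p2 + 1) (stepB _ (p1 + 1, p2) s))))
      (stepB_memB _ _ (stepB _ (p1 - 1, p2) (stepB _ (p1, p2 + 1) (stepB _ (p1 + 1, p2) s))))
  have hpred : ∀ x : Nat × Nat,
      (((((p1 + 1 < h ∧ cellA g (p1 + 1) p2 = ".") ∧ x = (p1 + 1, p2)) ∨
         ((p2 + 1 < w ∧ cellA g p1 (p2 + 1) = ".") ∧ x = (p1, p2 + 1))) ∨
        ((1 ≤ p1 ∧ p1 - 1 < h ∧ cellA g (p1 - 1) p2 = ".") ∧ x = (p1 - 1, p2))) ∨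
       ((1 ≤ p2 ∧ p2 - 1 < w ∧ cellA g p1 (p2 - 1) = ".") ∧ x = (p1, p2 - 1))) ↔
      Acond h w g (p1, p2) x := by
    intro x
    unfold Acond
    tauto
  constructor
  · intro x
    rw [show (expandB h w g s (p1, p2)).1
        = (stepB _ (p1, p2 - 1) (stepB _ (p1 - 1, p2) (stepB _ (p1, p2 + 1) (stepB _ (p1 + 1, p2) s)))).1 from rfl]
    rw [c1234.1 x, hpred x]
  · intro x
    rw [show (expandB h w g s (p1, p2)).2
        = (stepB _ (p1, p2 - 1) (stepB _ (p1 - 1, p2) (stepB _ (p1, p2 + 1) (stepB _ (p1 + 1, p2) s)))).2 from rfl]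
    rw [c1234.2 x, hpred x]

theorem expand_sub (h w : Nat) (g : List (List String)) (p : Nat × Nat)
    (s : List (Nat × Nat) × List (Nat × Nat)) (hs : ∀ x ∈ s.1, x ∈ s.2) :
    ∀ x ∈ (expandB h w g s p).1, x ∈ (expandB h w g s p).2 := by
  intro x hx
  rw [(expand_mem h w g p s).1 x] at hx
  rw [(expand_mem h w g p s).2 x]
  rcases hx with hx | hx
  · exact Or.inl (hs x hx)
  · exact Or.inr hx

theorem fold_mem (h w : Nat) (g : List (List String)) :
    ∀ (fr : List (Nat × Nat)) (s : List (Nat × Nat) × List (Nat × Nat)),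
      (∀ x ∈ s.1, x ∈ s.2) →
      (∀ x, x ∈ (fr.foldl (expandB h w g) s).1 ↔ x ∈ s.1 ∨ (x ∉ s.2 ∧ ∃ p ∈ fr, Acond h w g p x)) ∧
      (∀ x, x ∈ (fr.foldl (expandB h w g) s).2 ↔ x ∈ s.2 ∨ (x ∉ s.2 ∧ ∃ p ∈ fr, Acond h w g p x)) := by
  intro fr
  induction fr with
  | nil =>
    intro s hs
    constructor <;> intro x <;> simp
  | cons p fr ih =>
    intro s hs
    have hsub : ∀ y ∈ (expandB h w g s p).1, y ∈ (expandB h w g s p).2 := expand_sub h w g p s hs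
    have hih := ih (expandB h w g s p) hsub
    have hcomp := comp_mem s (expandB h w g s p) (fr.foldl (expandB h w g) (expandB h w g s p))
      (Acond h w g p) (fun x => ∃ q ∈ fr, Acond h w g q x)
      (expand_mem h w g p s).1 (expand_mem h w g p s).2 hih.1 hih.2
    have hcons : ∀ x : Nat × Nat,
        (Acond h w g p x ∨ ∃ q ∈ fr, Acond h w g q x) ↔ ∃ q ∈ p :: fr, Acond h w g q x := by
      intro x; simp
    constructor
    · intro x
      rw [List.foldl_cons, hcomp.1 x, hcons x]
    · intro x
      rw [List.foldl_cons, hcomp.2 x, hcons x]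

theorem mem_next1 (h w : Nat) (g : List (List String)) (fr v : List (Nat × Nat)) (x : Nat × Nat) :
    x ∈ (fr.foldl (expandB h w g) ([], v)).1 ↔ x ∉ v ∧ ∃ p ∈ fr, Acond h w g p x := by
  have := (fold_mem h w g fr ([], v) (by intro y hy; cases hy)).1 x
  simpa using this

theorem mem_next2 (h w : Nat) (g : List (List String)) (fr v : List (Nat × Nat)) (x : Nat × Nat) :
    x ∈ (fr.foldl (expandB h w g) ([], v)).2 ↔ x ∈ v ∨ (x ∉ v ∧ ∃ p ∈ fr, Acond h w g p x) := by
  have := (fold_mem h w g fr ([], v) (by intro y hy; cases hy)).2 x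
  simpa using this

theorem Acond_iff (h w : Nat) (g : List (List String)) (p c : Nat × Nat)
    (hp : p ∈ allCells h w) :
    Acond h w g p c ↔ (c ∈ allCells h w ∧ cellA g c.1 c.2 = "." ∧ AdjN h w c p) := by
  obtain ⟨p1, p2⟩ := p
  obtain ⟨c1, c2⟩ := c
  rw [mem_allCells] at hp
  unfold Acond AdjN
  simp only [mem_allCells, Prod.mk.injEq]
  constructor
  · rintro (⟨hlt, hdot, h1, h2⟩ | ⟨hlt, hdot, h1, h2⟩ | ⟨hg1, hlt, hdot, h1, h2⟩ | ⟨hg1, hlt, hdot, h1, h2⟩)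
    · subst h1; subst h2
      exact ⟨⟨hlt, hp.2⟩, hdot, hp.1, hp.2, by omega⟩
    · subst h1; subst h2
      exact ⟨⟨hp.1, hlt⟩, hdot, hp.1, hp.2, by omega⟩
    · subst h1; subst h2
      exact ⟨⟨hlt, hp.2⟩, hdot, hp.1, hp.2, by omega⟩
    · subst h1; subst h2
      exact ⟨⟨hp.1, hlt⟩, hdot, hp.1, hp.2, by omega⟩
  · rintro ⟨⟨hc1, hc2⟩, hdot, hp1', hp2', hd⟩
    rcases hd with ⟨h1, h2⟩ | ⟨h1, h2⟩ | ⟨h1, h2⟩ | ⟨h1, h2⟩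
    · -- c1 = p1 + 1, c2 = p2
      refine Or.inl ⟨by omega, ?_, by omega, by omega⟩
      have e1 : p1 + 1 = c1 := by omega
      have e2 : p2 = c2 := by omega
      rw [e1, e2]; exact hdot
    · -- p1 = c1 + 1: c = (p1 - 1, p2)
      refine Or.inr (Or.inr (Or.inl ⟨by omega, by omega, ?_, by omega, by omega⟩))
      have e1 : p1 - 1 = c1 := by omega
      have e2 : p2 = c2 := by omega
      rw [e1, e2]; exact hdot
    · -- c2 = p2 + 1
      refine Or.inr (Or.inl ⟨by omega, ?_, by omega, by omega⟩)
      have e1 : p1 = c1 := by omega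
      have e2 : p2 + 1 = c2 := by omega
      rw [e1, e2]; exact hdot
    · -- p2 = c2 + 1: c = (p1, p2 - 1)
      refine Or.inr (Or.inr (Or.inr ⟨by omega, by omega, ?_, by omega, by omega⟩))
      have e1 : p1 = c1 := by omega
      have e2 : p2 - 1 = c2 := by omega
      rw [e1, e2]; exact hdot

-- ---------- the coupling invariant ----------

def BndM (h w k : Nat) (M : List (List Nat)) : Prop :=
  ∀ c ∈ allCells h w, Dget M c.1 c.2 ≤ k ∨ Dget M c.1 c.2 = h * w + 1

def ClosM (h w : Nat) (g : List (List String)) (k : Nat) (M : List (List Nat)) : Prop :=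
  ∀ c ∈ allCells h w, cellA g c.1 c.2 = "." →
    ∀ n : Nat × Nat, AdjN h w c n → Dget M n.1 n.2 < k →
      Dget M c.1 c.2 ≤ Dget M n.1 n.2 + 1

def InvC (h w : Nat) (g : List (List String)) (k : Nat) (M : List (List Nat))
    (fr v : List (Nat × Nat)) : Prop :=
  ShapedM h w M ∧ BndM h w k M ∧
  (∀ c : Nat × Nat, c ∈ v ↔ (c ∈ allCells h w ∧ Dget M c.1 c.2 ≤ k)) ∧
  (∀ c : Nat × Nat, c ∈ fr ↔ (c ∈ allCells h w ∧ Dget M c.1 c.2 = k)) ∧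
  ClosM h w g k M ∧ k + unv h w v ≤ h * w

theorem unv_pos (h w : Nat) (v : List (Nat × Nat)) (c : Nat × Nat)
    (hc : c ∈ allCells h w) (hv : c ∉ v) : 1 ≤ unv h w v := by
  unfold unv
  have : 0 < (allCells h w).countP (fun c => decide (c ∉ v)) :=
    List.countP_pos_iff.2 ⟨c, hc, by simpa using hv⟩
  omega

-- the trichotomy the relaxation round satisfies under the invariant
theorem relax_tri (h w : Nat) (g : List (List String)) (k : Nat) (M : List (List Nat))
    (fr v : List (Nat × Nat)) (hI : InvC h w g k M fr v) (c : Nat × Nat) (hc : c ∈ allCells h w) :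
    (Dget M c.1 c.2 ≤ k ∧ relaxVal h w g M c.1 c.2 = Dget M c.1 c.2) ∨
    (Dget M c.1 c.2 = h * w + 1 ∧ cellA g c.1 c.2 = "." ∧ (∃ n ∈ fr, AdjN h w c n) ∧
      relaxVal h w g M c.1 c.2 = k + 1) ∨
    (Dget M c.1 c.2 = h * w + 1 ∧ ¬(cellA g c.1 c.2 = "." ∧ ∃ n ∈ fr, AdjN h w c n) ∧
      relaxVal h w g M c.1 c.2 = h * w + 1) := by
  obtain ⟨hSh, hBnd, hV, hF, hCl, hU⟩ := hI
  have hk : k ≤ h * w := by omega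
  rcases hBnd c hc with hle | hinf
  · -- stable value
    left
    refine ⟨hle, ?_⟩
    rcases rv_cases h w g M c.1 c.2 with he | ⟨hdot, n, hadj, he, hlt⟩
    · exact he
    · exfalso
      have hnk : Dget M n.1 n.2 < k := by omega
      have := hCl c hc hdot n hadj hnk
      omega
  · have hcv : c ∉ v := by
      rw [hV]
      intro ⟨_, hle⟩
      omega
    have hup : 1 ≤ unv h w v := unv_pos h w v c hc hcv
    have hk1 : k + 1 ≤ h * w := by omega
    by_cases hfr : cellA g c.1 c.2 = "." ∧ ∃ n ∈ fr, AdjN h w c n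
    · right; left
      obtain ⟨hdot, n, hnfr, hadj⟩ := hfr
      have hnk : Dget M n.1 n.2 = k := ((hF n).1 hnfr).2
      refine ⟨hinf, hdot, ⟨n, hnfr, hadj⟩, ?_⟩
      have hub : relaxVal h w g M c.1 c.2 ≤ k + 1 := by
        have := rv_le_adj h w g M c.1 c.2 n hdot hadj
        omega
      rcases rv_cases h w g M c.1 c.2 with he | ⟨hdot', m, hadjm, hem, hltm⟩
      · omega
      · have hmg : m ∈ allCells h w := by
          obtain ⟨m1, m2⟩ := m
          exact mem_allCells.2 ⟨hadjm.1, hadjm.2.1⟩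
        rcases hBnd m hmg with hmle | hminf
        · rcases Nat.lt_or_ge (Dget M m.1 m.2) k with hmlt | hmge
          · exfalso
            have := hCl c hc hdot' m hadjm hmlt
            omega
          · have : Dget M m.1 m.2 = k := by omega
            omega
        · omega
    · right; right
      refine ⟨hinf, hfr, ?_⟩
      rcases rv_cases h w g M c.1 c.2 with he | ⟨hdot', m, hadjm, hem, hltm⟩
      · omega
      · exfalso
        have hmg : m ∈ allCells h w := by
          obtain ⟨m1, m2⟩ := m
          exact mem_allCells.2 ⟨hadjm.1, hadjm.2.1⟩
        rcases hBnd m hmg with hmle | hminf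
        · rcases Nat.lt_or_ge (Dget M m.1 m.2) k with hmlt | hmge
          · have := hCl c hc hdot' m hadjm hmlt
            omega
          · have hmk : Dget M m.1 m.2 = k := by omega
            exact hfr ⟨hdot', m, (hF m).2 ⟨hmg, hmk⟩, hadjm⟩
        · omega

theorem relax_fixp (h w : Nat) (g : List (List String)) (k : Nat) (M : List (List Nat))
    (fr v : List (Nat × Nat)) (hI : InvC h w g k M fr v)
    (hS : (fr.foldl (expandB h w g) ([], v)).1 = []) :
    relaxRound h w g M = M := by
  apply matrix_ext (shaped_relaxRound h w g M) hI.1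
  intro a ha b hb
  have hc : ((a, b) : Nat × Nat) ∈ allCells h w := mem_allCells.2 ⟨ha, hb⟩
  rw [Dget_relaxRound h w g M ha hb]
  rcases relax_tri h w g k M fr v hI (a, b) hc with ⟨_, he⟩ | ⟨hinf, hdot, ⟨n, hnfr, hadj⟩, he⟩ | ⟨hinf, _, he⟩
  · exact he
  · exfalso
    have hcv : (a, b) ∉ v := by
      rw [hI.2.2.1]
      intro ⟨_, hle⟩
      have : k ≤ h * w := by have := hI.2.2.2.2.2; omega
      omega
    have hng : n ∈ allCells h w := ((hI.2.2.2.1) n).1 hnfr |>.1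
    have : ((a, b) : Nat × Nat) ∈ (fr.foldl (expandB h w g) ([], v)).1 := by
      rw [mem_next1]
      exact ⟨hcv, n, hnfr, (Acond_iff h w g n (a, b) hng).2 ⟨hc, hdot, hadj⟩⟩
    rw [hS] at this
    cases this
  · exact he.trans hinf.symm

theorem relax_ne (h w : Nat) (g : List (List String)) (k : Nat) (M : List (List Nat))
    (fr v : List (Nat × Nat)) (hI : InvC h w g k M fr v)
    (hS : (fr.foldl (expandB h w g) ([], v)).1 ≠ []) :
    relaxRound h w g M ≠ M := by
  obtain ⟨c, hcS⟩ := List.exists_mem_of_ne_nil _ hS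
  obtain ⟨c1, c2⟩ := c
  rw [mem_next1] at hcS
  obtain ⟨hcv, p, hpfr, hAc⟩ := hcS
  have hpg : p ∈ allCells h w := ((hI.2.2.2.1) p).1 hpfr |>.1
  rw [Acond_iff h w g p (c1, c2) hpg] at hAc
  obtain ⟨hcg, hdot, hadj⟩ := hAc
  have hb := mem_allCells.1 hcg
  rcases relax_tri h w g k M fr v hI (c1, c2) hcg with ⟨hle, _⟩ | ⟨hinf, _, _, he⟩ | ⟨hinf, hno, _⟩
  · exact absurd ((hI.2.2.1 (c1, c2)).2 ⟨hcg, hle⟩) hcv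
  · intro hEq
    have hDr : Dget (relaxRound h w g M) c1 c2 = relaxVal h w g M c1 c2 :=
      Dget_relaxRound h w g M hb.1 hb.2
    have heq2 : Dget (relaxRound h w g M) c1 c2 = Dget M c1 c2 := by rw [hEq]
    have hup : 1 ≤ unv h w v := unv_pos h w v (c1, c2) hcg hcv
    have h6 := hI.2.2.2.2.2
    have he' : relaxVal h w g M c1 c2 = k + 1 := he
    have hinf' : Dget M c1 c2 = h * w + 1 := hinf
    omega
  · exact absurd ⟨hdot, p, hpfr, hadj⟩ hno

theorem inv_step (h w : Nat) (g : List (List String)) (k : Nat) (M : List (List Nat))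
    (fr v : List (Nat × Nat)) (hI : InvC h w g k M fr v)
    (hS : (fr.foldl (expandB h w g) ([], v)).1 ≠ []) :
    InvC h w g (k + 1) (relaxRound h w g M) (fr.foldl (expandB h w g) ([], v)).1
      (fr.foldl (expandB h w g) ([], v)).2 := by
  obtain ⟨hSh, hBnd, hV, hF, hCl, hU⟩ := hI
  have hIfull : InvC h w g k M fr v := ⟨hSh, hBnd, hV, hF, hCl, hU⟩
  have hk : k ≤ h * w := by omega
  have tri := relax_tri h w g k M fr v hIfull
  have hDg : ∀ (c : Nat × Nat), c ∈ allCells h w →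
      Dget (relaxRound h w g M) c.1 c.2 = relaxVal h w g M c.1 c.2 := by
    intro c hc
    obtain ⟨c1, c2⟩ := c
    have := mem_allCells.1 hc
    exact Dget_relaxRound h w g M this.1 this.2
  have hgrid_v : ∀ c : Nat × Nat, c ∈ v → c ∈ allCells h w := fun c hc => ((hV c).1 hc).1
  have hgrid_fr : ∀ c ∈ fr, c.1 < h ∧ c.2 < w := by
    intro c hc
    have := ((hF c).1 hc).1
    obtain ⟨c1, c2⟩ := c
    exact mem_allCells.1 this
  -- new-frontier membership in invariant shape
  have hfr' : ∀ c : Nat × Nat, c ∈ (fr.foldl (expandB h w g) ([], v)).1 ↔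
      (c ∉ v ∧ c ∈ allCells h w ∧ cellA g c.1 c.2 = "." ∧ ∃ n ∈ fr, AdjN h w c n) := by
    intro c
    rw [mem_next1]
    constructor
    · rintro ⟨hcv, p, hp, hAc⟩
      rw [Acond_iff h w g p c (((hF p).1 hp).1)] at hAc
      exact ⟨hcv, hAc.1, hAc.2.1, p, hp, hAc.2.2⟩
    · rintro ⟨hcv, hcg, hdot, n, hn, hadj⟩
      exact ⟨hcv, n, hn, (Acond_iff h w g n c (((hF n).1 hn).1)).2 ⟨hcg, hdot, hadj⟩⟩
  have hnotv_inf : ∀ c : Nat × Nat, c ∈ allCells h w → c ∉ v → Dget M c.1 c.2 = h * w + 1 := by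
    intro c hcg hcv
    rcases hBnd c hcg with hle | hinf
    · exact absurd ((hV c).2 ⟨hcg, hle⟩) hcv
    · exact hinf
  have hk1 : k + 1 ≤ h * w := by
    obtain ⟨c, hcS⟩ := List.exists_mem_of_ne_nil _ hS
    have := (hfr' c).1 hcS
    have := unv_pos h w v c this.2.1 this.1
    omega
  refine ⟨shaped_relaxRound h w g M, ?_, ?_, ?_, ?_, ?_⟩
  · -- Bnd
    intro c hc
    rw [hDg c hc]
    rcases tri c hc with ⟨hle, he⟩ | ⟨_, _, _, he⟩ | ⟨_, _, he⟩
    · left; omega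
    · left; omega
    · right; exact he
  · -- visited characterisation
    intro c
    rw [mem_next2]
    constructor
    · rintro (hcv | ⟨hcv, p, hp, hAc⟩)
      · have hcg := hgrid_v c hcv
        have hle := ((hV c).1 hcv).2
        rcases tri c hcg with ⟨_, he⟩ | ⟨hinf, _⟩ | ⟨hinf, _⟩
        · rw [hDg c hcg, he]; exact ⟨hcg, by omega⟩
        · omega
        · omega
      · rw [Acond_iff h w g p c (((hF p).1 hp).1)] at hAc
        obtain ⟨hcg, hdot, hadj⟩ := hAc
        rcases tri c hcg with ⟨hle, _⟩ | ⟨_, _, _, he⟩ | ⟨_, hno, _⟩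
        · exact absurd ((hV c).2 ⟨hcg, hle⟩) hcv
        · rw [hDg c hcg, he]; exact ⟨hcg, le_refl _⟩
        · exact absurd ⟨hdot, p, hp, hadj⟩ hno
    · rintro ⟨hcg, hle⟩
      rw [hDg c hcg] at hle
      rcases tri c hcg with ⟨hle0, he⟩ | ⟨hinf, hdot, ⟨n, hn, hadj⟩, he⟩ | ⟨hinf, _, he⟩
      · exact Or.inl ((hV c).2 ⟨hcg, hle0⟩)
      · refine Or.inr ⟨?_, n, hn, (Acond_iff h w g n c (((hF n).1 hn).1)).2 ⟨hcg, hdot, hadj⟩⟩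
        rw [hV]
        intro ⟨_, hle'⟩
        omega
      · omega
  · -- frontier characterisation
    intro c
    rw [hfr' c]
    constructor
    · rintro ⟨hcv, hcg, hdot, n, hn, hadj⟩
      rcases tri c hcg with ⟨hle, _⟩ | ⟨_, _, _, he⟩ | ⟨_, hno, _⟩
      · exact absurd ((hV c).2 ⟨hcg, hle⟩) hcv
      · rw [hDg c hcg, he]; exact ⟨hcg, rfl⟩
      · exact absurd ⟨hdot, n, hn, hadj⟩ hno
    · rintro ⟨hcg, he⟩
      rw [hDg c hcg] at he
      rcases tri c hcg with ⟨hle, he0⟩ | ⟨hinf, hdot, ⟨n, hn, hadj⟩, he0⟩ | ⟨hinf, _, he0⟩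
      · omega
      · refine ⟨?_, hcg, hdot, n, hn, hadj⟩
        rw [hV]
        intro ⟨_, hle'⟩
        omega
      · omega
  · -- closure
    intro c hcg hdot n hadj hnlt
    have hng : n ∈ allCells h w := by
      obtain ⟨n1, n2⟩ := n
      exact mem_allCells.2 ⟨hadj.1, hadj.2.1⟩
    rw [hDg n hng] at hnlt ⊢
    rw [hDg c hcg]
    rcases tri n hng with ⟨hnle, hne⟩ | ⟨_, _, _, hne⟩ | ⟨_, _, hne⟩
    · rw [hne] at hnlt ⊢
      rcases Nat.lt_or_ge (Dget M n.1 n.2) k with hnk | hnk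
      · have hcle := hCl c hcg hdot n hadj hnk
        rcases tri c hcg with ⟨hcle', hce⟩ | ⟨hinf, _⟩ | ⟨hinf, _⟩
        · rw [hce]; omega
        · omega
        · omega
      · have hnk' : Dget M n.1 n.2 = k := by omega
        have hnfr : n ∈ fr := (hF n).2 ⟨hng, hnk'⟩
        rcases tri c hcg with ⟨hcle', hce⟩ | ⟨hinf, _, _, hce⟩ | ⟨hinf, hno, _⟩
        · rw [hce]; omega
        · rw [hce]; omega
        · exact absurd ⟨hdot, n, hnfr, hadj⟩ hno
    · omega
    · omega
  · -- counting
    have hacc := foldl_expandB_unv h w g fr hgrid_fr ([], v)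
    simp only [List.length_nil, Nat.add_zero] at hacc
    have hlen : 1 ≤ (fr.foldl (expandB h w g) ([], v)).1.length := by
      cases hXl : (fr.foldl (expandB h w g) ([], v)).1 with
      | nil => exact absurd hXl hS
      | cons a l => simp
    omega

-- ---------- the fold computing the max finite entry ----------

theorem fold_row_le (INF k : Nat) :
    ∀ (l : List Nat) (acc : Nat), (∀ d ∈ l, d < INF → d ≤ k) → acc ≤ k →
      l.foldl (fun e d => if d < INF then max e d else e) acc ≤ k := by
  intro l
  induction l with
  | nil => intro acc _ h; exact h
  | cons d l ih =>
    intro acc hl hacc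
    rw [List.foldl_cons]
    apply ih _ (fun x hx => hl x (by simp [hx]))
    split_ifs with hd
    · have := hl d (by simp) hd
      omega
    · exact hacc

theorem fold_row_ge (INF : Nat) :
    ∀ (l : List Nat) (acc : Nat), acc ≤ l.foldl (fun e d => if d < INF then max e d else e) acc := by
  intro l
  induction l with
  | nil => intro acc; exact le_refl _
  | cons d l ih =>
    intro acc
    rw [List.foldl_cons]
    refine le_trans ?_ (ih _)
    split_ifs <;> omega

theorem fold_row_mem (INF k : Nat) :
    ∀ (l : List Nat) (acc : Nat), k ∈ l → k < INF →
      k ≤ l.foldl (fun e d => if d < INF then max e d else e) acc := by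
  intro l
  induction l with
  | nil => intro acc hk; cases hk
  | cons d l ih =>
    intro acc hk hlt
    rw [List.foldl_cons]
    rcases List.mem_cons.1 hk with rfl | hk'
    · refine le_trans ?_ (fold_row_ge INF l _)
      rw [if_pos hlt]
      omega
    · exact ih _ hk' hlt

theorem maxFinite_eq (h w INF k : Nat) (M : List (List Nat)) (hSh : ShapedM h w M)
    (hbd : ∀ c ∈ allCells h w, Dget M c.1 c.2 ≤ k ∨ Dget M c.1 c.2 = INF)
    (hex : ∃ c ∈ allCells h w, Dget M c.1 c.2 = k) (hk : k < INF) :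
    maxFinite INF M = k := by
  -- every entry of M is some Dget at in-grid indices
  have hentry : ∀ r ∈ M, ∀ d ∈ r, d < INF → d ≤ k := by
    intro r hr d hd hdlt
    obtain ⟨a, ha, rfl⟩ := List.mem_iff_getElem.1 hr
    obtain ⟨b, hb, rfl⟩ := List.mem_iff_getElem.1 hd
    have hlenM : M.length = h := hSh.1
    have hag : a < h := by omega
    have hbg : b < w := by
      have := hSh.2 _ (M.getElem_mem ha)
      omega
    have hcg : ((a, b) : Nat × Nat) ∈ allCells h w := mem_allCells.2 ⟨hag, hbg⟩
    have hD := Dget_eq_getElem (M := M) (a := a) (b := b) ha hb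
    rcases hbd (a, b) hcg with hle | hinf
    · rw [hD] at hle; exact hle
    · rw [hD] at hinf; omega
  apply le_antisymm
  · -- upper bound: fold over rows
    unfold maxFinite
    have : ∀ (Ms : List (List Nat)) (acc : Nat), (∀ r ∈ Ms, ∀ d ∈ r, d < INF → d ≤ k) → acc ≤ k →
        Ms.foldl (fun e row => row.foldl (fun e d => if d < INF then max e d else e) e) acc ≤ k := by
      intro Ms
      induction Ms with
      | nil => intro acc _ h; exact h
      | cons r Ms ih =>
        intro acc hMs hacc
        rw [List.foldl_cons]
        exact ih _ (fun r' hr' => hMs r' (by simp [hr'])) (fold_row_le INF k r acc (hMs r (by simp)) hacc)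
    exact this M 0 hentry (by omega)
  · -- lower bound: the witness entry
    obtain ⟨c, hcg, hck⟩ := hex
    obtain ⟨c1, c2⟩ := c
    have hb := mem_allCells.1 hcg
    have hlenM : M.length = h := hSh.1
    have ha1 : c1 < M.length := by omega
    have hrow : (M[c1]).length = w := hSh.2 _ (M.getElem_mem ha1)
    have ha2 : c2 < (M[c1]).length := by omega
    have hD := Dget_eq_getElem (M := M) (a := c1) (b := c2) ha1 ha2
    simp only at hck
    rw [hD] at hck
    have hmemr : M[c1] ∈ M := M.getElem_mem ha1
    have hmemd : k ∈ M[c1] := by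
      rw [← hck]; exact List.getElem_mem ha2
    unfold maxFinite
    have hmono : ∀ (Ms : List (List Nat)) (acc : Nat),
        acc ≤ Ms.foldl (fun e row => row.foldl (fun e d => if d < INF then max e d else e) e) acc := by
      intro Ms
      induction Ms with
      | nil => intro acc; exact le_refl _
      | cons r Ms ih =>
        intro acc
        rw [List.foldl_cons]
        exact le_trans (fold_row_ge INF r acc) (ih _)
    have : ∀ (Ms : List (List Nat)) (acc : Nat), M[c1] ∈ Ms →
        k ≤ Ms.foldl (fun e row => row.foldl (fun e d => if d < INF then max e d else e) e) acc := by
      intro Ms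
      induction Ms with
      | nil => intro acc hm; cases hm
      | cons r Ms ih =>
        intro acc hm
        rw [List.foldl_cons]
        rcases List.mem_cons.1 hm with rfl | hm'
        · exact le_trans (fold_row_mem INF k _ acc hmemd hk) (hmono Ms _)
        · exact ih _ hm'
    exact this M 0 hmemr

theorem rounds_fix (h w : Nat) (g : List (List String)) (M : List (List Nat))
    (hfix : relaxRound h w g M = M) : ∀ m, rounds h w g m M = M := by
  intro m
  cases m with
  | zero => rfl
  | succ m => simp [rounds, hfix]

-- ---------- the main simulation ----------

theorem bloop_eq_rounds (h w : Nat) (g : List (List String)) :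
    ∀ (f : Nat) (k : Nat) (M : List (List Nat)) (fr v : List (Nat × Nat)),
      InvC h w g k M fr v → fr ≠ [] → unv h w v < f →
      bloop h w g f fr v k = maxFinite (h * w + 1) (rounds h w g (h * w - k) M) := by
  intro f
  induction f with
  | zero => intro k M fr v _ _ hf; omega
  | succ f ih =>
    intro k M fr v hI hfr hf
    have hex : ∃ c ∈ allCells h w, Dget M c.1 c.2 = k := by
      obtain ⟨c, hc⟩ := List.exists_mem_of_ne_nil _ hfr
      exact ⟨c, ((hI.2.2.2.1 c).1 hc).1, ((hI.2.2.2.1 c).1 hc).2⟩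
    have hk : k ≤ h * w := by have := hI.2.2.2.2.2; omega
    by_cases hS : (fr.foldl (expandB h w g) ([], v)).1 = []
    · -- frontier dies: both sides return k
      have hfix := relax_fixp h w g k M fr v hI hS
      rw [rounds_fix h w g M hfix]
      have hmax := maxFinite_eq h w (h * w + 1) k M hI.1 hI.2.1 hex (by omega)
      rw [hmax]
      simp [bloop, hS]
    · -- frontier alive: one more level ↔ one more round
      have hne := relax_ne h w g k M fr v hI hS
      have hI' := inv_step h w g k M fr v hI hS
      have hk1 : k + 1 ≤ h * w := by have := hI'.2.2.2.2.2; omega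
      have hstep : h * w - k = (h * w - (k + 1)) + 1 := by omega
      have hrounds : rounds h w g (h * w - k) M
          = rounds h w g (h * w - (k + 1)) (relaxRound h w g M) := by
        rw [hstep]
        simp [rounds, hne]
      have hacc := foldl_expandB_unv h w g fr
        (fun c hc => by
          have := ((hI.2.2.2.1 c).1 hc).1
          obtain ⟨c1, c2⟩ := c
          exact mem_allCells.1 this) ([], v)
      simp only [List.length_nil, Nat.add_zero] at hacc
      have hlen : 1 ≤ (fr.foldl (expandB h w g) ([], v)).1.length := by
        cases hXl : (fr.foldl (expandB h w g) ([], v)).1 with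
        | nil => exact absurd hXl hS
        | cons a l => simp
      have hbl : bloop h w g (f + 1) fr v k
          = bloop h w g f (fr.foldl (expandB h w g) ([], v)).1 (fr.foldl (expandB h w g) ([], v)).2 (k + 1) := by
        simp only [bloop]
        rw [if_neg hS]
      rw [hbl, hrounds]
      exact ih (k + 1) (relaxRound h w g M) _ _ hI' hS (by omega)

theorem unv_nil (h w : Nat) : unv h w [] = h * w := by
  unfold unv
  rw [List.countP_eq_length.2 (by intro a _; simp), length_allCells]

theorem source_eqB (h w : Nat) (g : List (List String)) (i j : Nat) (hi : i < h) (hj : j < w) :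
    bloop h w g (h * w + 1) [(i, j)] [(i, j)] 0 = eccB h w g i j := by
  have hsg : ((i, j) : Nat × Nat) ∈ allCells h w := mem_allCells.2 ⟨hi, hj⟩
  have hwpos : 1 ≤ h * w := Nat.mul_pos (by omega) (by omega)
  have huv : unv h w [(i, j)] + 1 = h * w := by
    have := unv_snoc h w (v := []) hsg (by simp)
    rw [unv_nil] at this
    simpa using this
  have hinv : InvC h w g 0 (initM h w (h * w + 1) i j) [(i, j)] [(i, j)] := by
    refine ⟨shaped_initM h w (h * w + 1) i j, ?_, ?_, ?_, ?_, by omega⟩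
    · intro c hc
      obtain ⟨a, b⟩ := c
      have hb := mem_allCells.1 hc
      rw [Dget_initM h w (h * w + 1) i j hb.1 hb.2]
      split_ifs <;> omega
    · intro c
      obtain ⟨a, b⟩ := c
      constructor
      · intro hcv
        simp only [List.mem_singleton] at hcv
        rw [Prod.mk.injEq] at hcv
        obtain ⟨rfl, rfl⟩ := hcv
        rw [Dget_initM h w (h * w + 1) a b hi hj]
        simp [hsg]
      · rintro ⟨hcg, hle⟩
        have hb := mem_allCells.1 hcg
        rw [Dget_initM h w (h * w + 1) i j hb.1 hb.2] at hle
        simp only [List.mem_singleton]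
        by_contra hne
        rw [if_neg (by simpa [Prod.mk.injEq] using hne)] at hle
        omega
    · intro c
      obtain ⟨a, b⟩ := c
      constructor
      · intro hcv
        simp only [List.mem_singleton] at hcv
        rw [Prod.mk.injEq] at hcv
        obtain ⟨rfl, rfl⟩ := hcv
        rw [Dget_initM h w (h * w + 1) a b hi hj]
        simp [hsg]
      · rintro ⟨hcg, heq⟩
        have hb := mem_allCells.1 hcg
        rw [Dget_initM h w (h * w + 1) i j hb.1 hb.2] at heq
        simp only [List.mem_singleton]
        by_contra hne
        rw [if_neg (by simpa [Prod.mk.injEq] using hne)] at heq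
        omega
    · intro c hcg hdot n hadj hnlt
      omega
  have := bloop_eq_rounds h w g (h * w + 1) 0 (initM h w (h * w + 1) i j) [(i, j)] [(i, j)]
    hinv (by simp) (by omega)
  rw [this]
  unfold eccB
  rw [Nat.sub_zero]

-- ===== VERDICT (by name: the statement is the Claim_ definition above) =====
theorem mm_spec : Claim_equal_mm := by
  intro h_ w g _ _
  unfold Spec_mm mm mm_alt
  show ((((List.range h_.toNat).foldl (fun ret i => (List.range w.toNat).foldl (fun ret j =>
        if cellA g i j = "#" then ret
        else aloop h_.toNat w.toNat g (h_.toNat * w.toNat + 1) [(i, j, 0)] [(i, j)] ret) ret) 0 : Nat) : Int))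
      = (((List.range h_.toNat).foldl (fun best i => (List.range w.toNat).foldl (fun best j =>
        if cellA g i j = "#" then best
        else max best (eccB h_.toNat w.toNat g i j)) best) 0 : Nat) : Int)
  congr 1
  apply PySem.List.foldl_congr_mem
  intro ret i hi
  apply PySem.List.foldl_congr_mem
  intro ret' j hj
  by_cases hc : cellA g i j = "#"
  · simp [hc]
  · simp only [if_neg hc]
    rw [source_eq _ _ g i j (List.mem_range.1 hi) (List.mem_range.1 hj) ret',
        source_eqB _ _ g i j (List.mem_range.1 hi) (List.mem_range.1 hj)]
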